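-- pv_equiv track=rewrite | github.com/etienneCharignon/adventOfCode | 2021/test_j17_trick_shot.py | findallx
-- ===== SOURCE A (Python) =====
-- def findallx(vx):
--     all_x = []
--     v = vx
--     x = v
--     while(v > 0):
--         all_x.append(x)
--         v -= 1
--         x += v
--
--     return all_x
-- ===== SOURCE B (Python) =====
-- def findallx(vx):
--     return [(i + 1) * vx - i * (i + 1) // 2 for i in range(vx)]
-- ===== Notes on version B (the rewrite author's own statement) =====
-- stated objective: simpler
-- what changed: Replaces the running (v, x) accumulator loop with a direct closed-form comprehension: position i is the triangular partial sum (i+1)*vx - i*(i+1)//2, with no state carried between iterations.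
import Mathlib
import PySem

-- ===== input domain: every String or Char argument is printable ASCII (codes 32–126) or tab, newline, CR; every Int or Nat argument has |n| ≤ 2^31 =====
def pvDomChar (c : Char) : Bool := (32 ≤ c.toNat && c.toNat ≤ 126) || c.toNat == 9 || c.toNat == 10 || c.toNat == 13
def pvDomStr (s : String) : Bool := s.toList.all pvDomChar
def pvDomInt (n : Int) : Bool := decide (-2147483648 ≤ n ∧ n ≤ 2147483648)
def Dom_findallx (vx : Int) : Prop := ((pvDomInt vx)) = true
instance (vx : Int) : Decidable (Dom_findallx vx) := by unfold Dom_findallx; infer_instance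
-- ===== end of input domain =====

-- B replaces A's running (v, x) accumulator loop by a stateless closed-form comprehension (objective: simpler).

-- ===== PORT A =====
-- while(v > 0): append x; v -= 1; x += v
def findallxLoop (v x : Int) (all_x : List Int) : List Int :=
  if v > 0 then findallxLoop (v - 1) (x + (v - 1)) (all_x ++ [x]) else all_x
termination_by v.toNat
decreasing_by omega

def findallx (vx : Int) : List Int := findallxLoop vx vx []

-- ===== PORT B =====
def findallx_alt (vx : Int) : List Int :=
  (PySem.List.pyRange 0 vx 1).map (fun i => (i + 1) * vx - PySem.Int.floordiv (i * (i + 1)) 2)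

-- ===== PRECONDITION & SPEC =====
def Spec_findallx (vx : Int) (out : List Int) : Prop := out = findallx_alt vx
instance (vx : Int) (out : List Int) : Decidable (Spec_findallx vx out) := by unfold Spec_findallx; infer_instance

-- ===== CLAIM (what is proved, stated in full; the proofs are below) =====
def Claim_equal_findallx : Prop := ∀ (vx : Int), Dom_findallx vx → Spec_findallx vx (findallx vx)

-- ===== LEMMAS AND PROOFS =====

-- After i iterations starting from velocity v and position x, the appended value is x + i*v - i*(i+1)/2.
theorem findallxLoop_eq (n : Nat) : ∀ (x : Int) (acc : List Int),
    findallxLoop (n : Int) x acc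
      = acc ++ (List.range n).map (fun i : Nat => x + (i : Int) * n - ((i * (i + 1)) / 2 : Nat)) := by
  induction n with
  | zero =>
    intro x acc
    rw [findallxLoop]
    simp
  | succ n ih =>
    intro x acc
    rw [findallxLoop]
    have h1 : ((n : Int) + 1) > 0 := by positivity
    have hc : ((n + 1 : Nat) : Int) = (n : Int) + 1 := by push_cast; ring
    rw [hc]
    simp only [h1, if_pos, add_sub_cancel_right]
    rw [ih]
    rw [List.range_succ_eq_map]
    simp only [List.map_cons, List.map_map, List.append_assoc, List.singleton_append]
    congr 1
    congr 1
    · simp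
    apply List.map_congr_left
    intro i _
    simp only [Function.comp]
    have hdiv : ((i + 1) * (i + 1 + 1)) / 2 = (i * (i + 1)) / 2 + (i + 1) := by
      have : (i + 1) * (i + 1 + 1) = i * (i + 1) + 2 * (i + 1) := by ring
      omega
    rw [hdiv]
    push_cast
    ring

theorem findallx_spec_aux (vx : Int) : findallx vx = findallx_alt vx := by
  unfold findallx findallx_alt
  by_cases h : vx ≤ 0
  · rw [findallxLoop]
    simp [PySem.List.pyRange_one_eq_nil h, not_lt.mpr h]
  · rw [not_le] at h
    obtain ⟨n, rfl⟩ : ∃ n : Nat, vx = (n : Int) := ⟨vx.toNat, (Int.toNat_of_nonneg h.le).symm⟩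
    rw [findallxLoop_eq, PySem.List.pyRange_one]
    simp only [sub_zero, Int.toNat_natCast, List.map_map, List.nil_append]
    apply List.map_congr_left
    intro i _
    simp only [Function.comp, zero_add]
    rw [PySem.Int.floordiv_eq_ediv_of_pos (by omega)]
    have h2 : ((i * (i + 1) / 2 : Nat) : Int) = ((i : Int) * ((i : Int) + 1)) / 2 := by
      push_cast [Int.natCast_div]
      ring_nf
    rw [h2]
    ring

-- ===== VERDICT (by name: the statement is the Claim_ definition above) =====
theorem findallx_spec : Claim_equal_findallx := by
  intro vx _
  exact findallx_spec_aux vx
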